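-- pv_equiv track=rewrite | github.com/viethung2281996/image_compressing | rle.py | _get4bitMap
-- ===== SOURCE A (Python) =====
-- def _get4bitMap(encodedImage):
--     imgMap = ""
--
--     newEncodedImage = list(encodedImage)
--
--     I = range(0, len(newEncodedImage), 5)
--
--     for i in I:
--         imgMap += '{0:08b}'.format(newEncodedImage[i])
--
--     for i in sorted(list(I), reverse = True):
--         del newEncodedImage[i]
--
--     newEncodedImage = _flattenListOfList([_split8bitTo4bit(i) for i in newEncodedImage])
--
--     return (imgMap, newEncodedImage)
--
-- def _split8bitTo4bit(eightbit):
--     leftmask = 240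
--     rightmask = 15
--     left = (eightbit & leftmask) >> 4
--     right = eightbit & rightmask
--     return (left, right)
--
-- _flattenListOfList = lambda flat:[item for sublist in flat for item in sublist]
-- ===== SOURCE B (Python) =====
-- def _get4bitMap(encodedImage):
--     mapParts = []
--     nibbles = []
--     for i in range(0, len(encodedImage), 5):
--         chunk = encodedImage[i:i+5]
--         mapParts.append('{0:08b}'.format(chunk[0]))
--         for b in chunk[1:]:
--             nibbles.append((b >> 4) & 15)
--             nibbles.append(b & 15)
--     return ("".join(mapParts), nibbles)
-- ===== Notes on version B (the rewrite author's own statement) =====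
-- stated objective: faster
-- what changed: One pass over 5-byte blocks that emits the map byte and the nibble pairs of each block directly, replacing A's three passes (stride-indexed map collection, reverse-order element-by-element del, map+flatten) and its quadratic del loop.
import Mathlib
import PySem

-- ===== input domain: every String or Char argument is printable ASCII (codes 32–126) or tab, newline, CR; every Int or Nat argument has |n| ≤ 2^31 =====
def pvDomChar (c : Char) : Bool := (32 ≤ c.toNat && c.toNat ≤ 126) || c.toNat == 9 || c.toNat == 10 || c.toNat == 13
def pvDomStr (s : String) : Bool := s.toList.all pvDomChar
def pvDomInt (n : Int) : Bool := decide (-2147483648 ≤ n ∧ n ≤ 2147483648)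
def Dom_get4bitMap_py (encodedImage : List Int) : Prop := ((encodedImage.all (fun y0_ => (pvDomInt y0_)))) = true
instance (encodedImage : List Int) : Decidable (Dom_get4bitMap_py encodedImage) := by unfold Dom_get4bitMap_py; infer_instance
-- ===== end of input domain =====

-- B replaces A's three passes (stride-collect map bytes, reverse-order quadratic del, map+flatten)
-- with one pass over 5-byte blocks; objective: faster (removes the O(n^2) del), same return value.

-- ===== PORT A =====
-- '{0:08b}'.format(n): binary digits, sign-aware zero pad to width 8 (exact: format(n,'b').zfill(8))
def pyFormat08b (n : Int) : String := PySem.Str.zfill (PySem.Int.toBin n) 8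

-- del xs[i]; in A the index is always in range (it comes from range(0, len, 5))
def pyDel (xs : List Int) (i : Int) : List Int :=
  match PySem.List.pop? xs i with
  | some r => r.2
  | none => xs

def split8bitTo4bit_py (eightbit : Int) : Int × Int :=
  let leftmask : Int := 240
  let rightmask : Int := 15
  let left := (PySem.Int.band eightbit leftmask) >>> (4:Nat)
  let right := PySem.Int.band eightbit rightmask
  (left, right)

-- _flattenListOfList applied to 2-tuples: [item for sublist in flat for item in sublist]
def flattenListOfList_py (flat : List (Int × Int)) : List Int :=
  flat.flatMap (fun sub => [sub.1, sub.2])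

def get4bitMap_py (encodedImage : List Int) : String × List Int :=
  let imgMap : String := ""
  let newEncodedImage := encodedImage
  let I := PySem.List.pyRange 0 (PySem.List.len newEncodedImage) 5
  let imgMap := I.foldl (fun s i => s ++ pyFormat08b (PySem.List.pyGetD newEncodedImage i 0)) imgMap
  let newEncodedImage := (PySem.List.sorted I id true).foldl pyDel newEncodedImage
  let newEncodedImage2 := flattenListOfList_py (newEncodedImage.map split8bitTo4bit_py)
  (imgMap, newEncodedImage2)

-- ===== PORT B =====
-- one pass over the 5-byte blocks: chunk = b0 :: rest.take 4, next block at rest.drop 4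
def altGo : List Int → List String × List Int
  | [] => ([], [])
  | b0 :: rest =>
    let part := pyFormat08b b0
    let nib := (rest.take 4).flatMap (fun b => [(PySem.Int.band b 240) >>> (4:Nat), PySem.Int.band b 15])
    let r := altGo (rest.drop 4)
    (part :: r.1, nib ++ r.2)
termination_by xs => xs.length
decreasing_by simp

def get4bitMap_py_alt (encodedImage : List Int) : String × List Int :=
  let r := altGo encodedImage
  (String.join r.1, r.2)

-- ===== PRECONDITION & SPEC =====
def Spec_get4bitMap_py (encodedImage : List Int) (out : String × List Int) : Prop := out = get4bitMap_py_alt encodedImage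
instance (encodedImage : List Int) (out : String × List Int) : Decidable (Spec_get4bitMap_py encodedImage out) := by unfold Spec_get4bitMap_py; infer_instance

-- ===== CLAIM (what is proved, stated in full; the proofs are below) =====
def Claim_equal_get4bitMap_py : Prop := ∀ (encodedImage : List Int), Dom_get4bitMap_py encodedImage → Spec_get4bitMap_py encodedImage (get4bitMap_py encodedImage)

-- ===== LEMMAS AND PROOFS =====

-- proof-side characterisation of A's map string
def mapStrA : List Int → String
  | [] => ""
  | b0 :: rest => pyFormat08b b0 ++ mapStrA (rest.drop 4)
termination_by xs => xs.length
decreasing_by simp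

-- proof-side characterisation of A's reverse-delete pass
def stripMap : List Int → List Int
  | [] => []
  | _ :: rest => rest.take 4 ++ stripMap (rest.drop 4)
termination_by xs => xs.length
decreasing_by simp

theorem pyRange5_nil {n : Int} (h : n ≤ 0) : PySem.List.pyRange 0 n 5 = [] := by
  rw [PySem.List.pyRange_of_pos 0 n (by norm_num)]
  simp [show ¬ (0 < n) by omega]

theorem pyRange5_cons {n : Int} (h : 0 < n) :
    PySem.List.pyRange 0 n 5 = 0 :: (PySem.List.pyRange 0 (n-5) 5).map (· + 5) := by
  rw [PySem.List.pyRange_of_pos 0 n (by norm_num),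
      PySem.List.pyRange_of_pos 0 (n-5) (by norm_num)]
  have e1 : (if (0:Int) < n then ((n - 0 + 5 - 1) / 5).toNat else 0)
      = (if (0:Int) < n - 5 then ((n - 5 - 0 + 5 - 1) / 5).toNat else 0) + 1 := by
    split_ifs <;> omega
  rw [e1, List.range_succ_eq_map]
  simp only [List.map_cons, List.map_map, List.cons.injEq]
  refine ⟨by norm_num, ?_⟩
  apply List.map_congr_left
  intro k _
  simp only [Function.comp_apply, Nat.succ_eq_add_one]
  push_cast
  ring

theorem range5_len_drop (xs : List Int) :
    PySem.List.pyRange 0 ((xs.length : Int) - 5) 5 = PySem.List.pyRange 0 ((xs.drop 5).length : Int) 5 := by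
  by_cases h : 5 ≤ xs.length
  · congr 1
    simp
    omega
  · rw [pyRange5_nil (by omega), pyRange5_nil (by simp; omega)]

theorem foldl_str_shift {α : Type} (g : α → String) (l : List α) (s : String) :
    l.foldl (fun a i => a ++ g i) s = s ++ l.foldl (fun a i => a ++ g i) "" := by
  induction l generalizing s with
  | nil => simp
  | cons x t ih =>
    simp only [List.foldl_cons]
    rw [ih (s ++ g x), ih ("" ++ g x)]
    simp [String.append_assoc]

theorem join_cons (a : String) (l : List String) : String.join (a :: l) = a ++ String.join l := by
  simp only [String.join, List.foldl_cons]
  rw [foldl_str_shift (fun s : String => s)]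
  simp

theorem lemA1 (xs : List Int) :
    (PySem.List.pyRange 0 ((xs.length : Int)) 5).foldl
      (fun s i => s ++ pyFormat08b (PySem.List.pyGetD xs i 0)) "" = mapStrA xs := by
  induction xs using mapStrA.induct with
  | case1 => simp [pyRange5_nil, mapStrA]
  | case2 b0 rest ih =>
    have hlen : (0:Int) < ((b0 :: rest).length : Int) := by simp
    rw [pyRange5_cons hlen]
    simp only [List.foldl_cons, List.foldl_map]
    have h0 : PySem.List.pyGetD (b0 :: rest) 0 0 = b0 := by
      rw [PySem.List.pyGetD_of_nonneg _ _ (by norm_num)]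
      simp
    rw [h0]
    have hcong : (PySem.List.pyRange 0 (((b0 :: rest).length : Int) - 5) 5).foldl
        (fun s i => s ++ pyFormat08b (PySem.List.pyGetD (b0 :: rest) (i + 5) 0)) ("" ++ pyFormat08b b0)
        = (PySem.List.pyRange 0 (((b0 :: rest).length : Int) - 5) 5).foldl
        (fun s i => s ++ pyFormat08b (PySem.List.pyGetD (rest.drop 4) i 0)) ("" ++ pyFormat08b b0) := by
      apply List.foldl_ext
      intro a i hi
      rw [PySem.List.pyRange_of_pos 0 _ (by norm_num)] at hi
      rcases List.mem_map.mp hi with ⟨k, _, hk⟩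
      have hi0 : 0 ≤ i := by omega
      rw [PySem.List.pyGetD_of_nonneg _ _ (by omega), PySem.List.pyGetD_of_nonneg _ _ hi0]
      have hdrop : rest.drop 4 = (b0 :: rest).drop 5 := by simp [List.drop_succ_cons]
      rw [hdrop]
      simp only [List.getD_eq_getElem?_getD, List.getElem?_drop]
      have hidx : (i + 5).toNat = 5 + i.toNat := by omega
      rw [hidx]
    rw [hcong, foldl_str_shift]
    have hrange : PySem.List.pyRange 0 (((b0 :: rest).length : Int) - 5) 5
        = PySem.List.pyRange 0 (((rest.drop 4).length : Int)) 5 := by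
      have := range5_len_drop (b0 :: rest)
      simpa [List.drop_succ_cons] using this
    rw [hrange, ih]
    simp [mapStrA]

theorem pop?_oor (xs : List Int) (i : Int) (h : (xs.length : Int) ≤ i) : PySem.List.pop? xs i = none := by
  have h0 : 0 ≤ i := by omega
  simp [PySem.List.pop?, PySem.List.pyIdx?, h0, show ¬ (i < (xs.length : Int)) by omega]

theorem delShift1 (xs : List Int) (j : Int) (hj : 0 ≤ j) :
    pyDel xs (j + 5) = xs.take 5 ++ pyDel (xs.drop 5) j := by
  by_cases h : j + 5 < (xs.length : Int)
  · have hlt1 : (j+5).toNat < xs.length := by omega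
    have hlt2 : j.toNat < (xs.drop 5).length := by simp; omega
    have e1 := PySem.List.pop?_natCast xs (j+5).toNat hlt1
    have e2 := PySem.List.pop?_natCast (xs.drop 5) j.toNat hlt2
    rw [show ((j+5).toNat : Int) = j + 5 by omega] at e1
    rw [show ((j.toNat : Int)) = j by omega] at e2
    unfold pyDel
    rw [e1, e2]
    simp only
    conv_lhs => rw [← List.take_append_drop 5 xs]
    rw [List.eraseIdx_append]
    have hL : (xs.take 5).length = 5 := by simp; omega
    rw [hL, if_neg (by omega)]
    have : (j + 5).toNat - 5 = j.toNat := by omega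
    rw [this]
  · unfold pyDel
    rw [pop?_oor xs _ (by omega), pop?_oor (xs.drop 5) j (by simp; omega)]
    exact (List.take_append_drop 5 xs).symm

theorem delShiftFold (js : List Int) (xs : List Int) (hjs : ∀ j ∈ js, 0 ≤ j) :
    (js.map (· + 5)).foldl pyDel xs = xs.take 5 ++ js.foldl pyDel (xs.drop 5) := by
  induction js generalizing xs with
  | nil => simp
  | cons j t ih =>
    simp only [List.map_cons, List.foldl_cons]
    have hj : 0 ≤ j := hjs j (by simp)
    have ht : ∀ i ∈ t, 0 ≤ i := fun i hi => hjs i (by simp [hi])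
    rw [delShift1 xs j hj, ih _ ht]
    by_cases h5 : 5 ≤ xs.length
    · have hl : (xs.take 5).length = 5 := by simp; omega
      rw [List.take_append, List.drop_append, hl]
      simp
    · have hdrop : xs.drop 5 = [] := by simp; omega
      have hY : pyDel (xs.drop 5) j = [] := by
        rw [hdrop]
        unfold pyDel
        rw [pop?_oor _ _ (by simpa using hj)]
      rw [hY]
      have h1 : List.take 5 (List.take 5 xs) = List.take 5 xs := by simp [List.take_take]
      have h2 : List.drop 5 (List.take 5 xs) = ([] : List Int) := by
        apply List.drop_eq_nil_of_le
        simp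
      simp [h1, h2]

theorem pairwise_lt_pyRange5 (n : Int) : (PySem.List.pyRange 0 n 5).Pairwise (· < ·) := by
  rw [PySem.List.pyRange_of_pos 0 n (by norm_num)]
  refine List.Pairwise.map _ ?_ List.pairwise_lt_range
  intro a b hab
  omega

theorem sorted_rev_of_pairwise_lt (xs : List Int) (h : xs.Pairwise (· < ·)) :
    PySem.List.sorted xs id true = xs.reverse := by
  have hperm : (PySem.List.sorted xs id true).Perm xs.reverse :=
    (PySem.List.sorted_perm xs id true).trans (List.reverse_perm xs).symm
  have hnd : (PySem.List.sorted xs id true).Nodup :=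
    ((PySem.List.sorted_perm xs id true).nodup_iff).mpr (h.imp (fun hab => ne_of_lt hab))
  have hle : (PySem.List.sorted xs id true).Pairwise (fun a b => b ≤ a) :=
    PySem.List.sorted_pairwise_rev xs id
  have hlt : (PySem.List.sorted xs id true).Pairwise (fun a b => b < a) :=
    (hle.and hnd).imp (by intro a b hab; omega)
  have hrev : xs.reverse.Pairwise (fun a b => b < a) := by
    rw [List.pairwise_reverse]
    exact h
  exact List.eq_of_perm_of_sorted (by intro a b _ _ h1 h2; omega) hlt hrev hperm

theorem lemA2 (xs : List Int) :
    ((PySem.List.pyRange 0 ((xs.length : Int)) 5).reverse).foldl pyDel xs = stripMap xs := by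
  induction xs using stripMap.induct with
  | case1 => simp [pyRange5_nil, stripMap]
  | case2 b0 rest ih =>
    have hlen : (0:Int) < ((b0 :: rest).length : Int) := by simp
    rw [pyRange5_cons hlen, List.reverse_cons, List.foldl_append, ← List.map_reverse]
    have hmem : ∀ j ∈ (PySem.List.pyRange 0 (((b0 :: rest).length : Int) - 5) 5).reverse, 0 ≤ j := by
      intro j hj
      rw [List.mem_reverse, PySem.List.pyRange_of_pos 0 _ (by norm_num)] at hj
      rcases List.mem_map.mp hj with ⟨k, _, hk⟩
      omega
    rw [delShiftFold _ _ hmem]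
    have hd : (b0 :: rest).drop 5 = rest.drop 4 := by simp [List.drop_succ_cons]
    have ht : (b0 :: rest).take 5 = b0 :: rest.take 4 := rfl
    have hrange : PySem.List.pyRange 0 (((b0 :: rest).length : Int) - 5) 5
        = PySem.List.pyRange 0 (((rest.drop 4).length : Int)) 5 := by
      have := range5_len_drop (b0 :: rest)
      simpa [List.drop_succ_cons] using this
    rw [hd, ht, hrange, ih]
    simp only [List.foldl_cons, List.foldl_nil, List.cons_append]
    unfold pyDel
    rw [PySem.List.pop?_zero_cons]
    simp [stripMap]

theorem lemB1 (xs : List Int) : String.join (altGo xs).1 = mapStrA xs := by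
  induction xs using altGo.induct with
  | case1 => simp [altGo, mapStrA, String.join]
  | case2 b0 rest ih =>
    simp only [altGo]
    rw [join_cons, ih]
    simp [mapStrA]

theorem flat_split (l : List Int) :
    List.flatMap (fun b => [PySem.Int.band b 240 >>> (4:Nat), PySem.Int.band b 15]) l
      = List.flatMap (fun sub : Int × Int => [sub.1, sub.2]) (l.map split8bitTo4bit_py) := by
  induction l with
  | nil => simp
  | cons b t ih => simp [split8bitTo4bit_py, ih]

theorem lemB2 (xs : List Int) :
    (altGo xs).2 = flattenListOfList_py ((stripMap xs).map split8bitTo4bit_py) := by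
  induction xs using altGo.induct with
  | case1 => simp [altGo, stripMap, flattenListOfList_py]
  | case2 b0 rest ih =>
    simp only [altGo, stripMap]
    rw [ih]
    simp only [flattenListOfList_py, List.map_append, List.flatMap_append]
    congr 1
    exact flat_split _

theorem AeqB (xs : List Int) : get4bitMap_py xs = get4bitMap_py_alt xs := by
  simp only [get4bitMap_py, get4bitMap_py_alt, PySem.List.len_eq]
  rw [sorted_rev_of_pairwise_lt _ (pairwise_lt_pyRange5 _), lemA1, lemA2, ← lemB1, ← lemB2]

-- ===== VERDICT (by name: the statement is the Claim_ definition above) =====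
theorem get4bitMap_py_spec : Claim_equal_get4bitMap_py := by
  unfold Claim_equal_get4bitMap_py Spec_get4bitMap_py
  intro xs _
  exact AeqB xs
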